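-- pv_equiv track=rewrite | github.com/uewekenuewe/Advent-Of-Code | 2015/day08/day08.py | part1
-- ===== SOURCE A (Python) =====
-- def part1(l:str):
--     result = len(l) - 2
--     l = l[1:-1]
--     i = 0
--     while(i < len(l)):
--         if l[i] == '\\' and l[i+1] == '"':
--             result -= 1
--             i += 2
--         elif l[i] == '\\' and l[i+1] == '\\':
--             result -= 1
--             i += 2
--         elif l[i] == '\\' and l[i+1] == 'x':
--             i += 4
--             result -= 3
--         else:
--             i+=1
--
--     return result
-- ===== SOURCE B (Python) =====
-- def part1(l: str):
--     # Collapse escaped backslashes first (left-to-right, like the scan pairs them),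
--     # then every remaining backslash-escape is unambiguous and can just be counted.
--     t = l[1:-1].replace('\\\\', 'A')
--     return len(t) - t.count('\\"') - 3 * t.count('\\x')
-- ===== Notes on version B (the rewrite author's own statement) =====
-- stated objective: faster
-- what changed: Replaces the hand-written index-advancing scan with three bulk string operations: collapse escaped backslashes with one replace, then count the remaining \" and \x escapes and subtract their overhead from the length.
-- outside the precondition, e.g. on part1(''): A returns -2, B returns 0; on part1('"\\x\\"'): A returns 0, B returns 0; on part1('"\\x\\\\""'): A returns 2, B returns 1
import Mathlib
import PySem

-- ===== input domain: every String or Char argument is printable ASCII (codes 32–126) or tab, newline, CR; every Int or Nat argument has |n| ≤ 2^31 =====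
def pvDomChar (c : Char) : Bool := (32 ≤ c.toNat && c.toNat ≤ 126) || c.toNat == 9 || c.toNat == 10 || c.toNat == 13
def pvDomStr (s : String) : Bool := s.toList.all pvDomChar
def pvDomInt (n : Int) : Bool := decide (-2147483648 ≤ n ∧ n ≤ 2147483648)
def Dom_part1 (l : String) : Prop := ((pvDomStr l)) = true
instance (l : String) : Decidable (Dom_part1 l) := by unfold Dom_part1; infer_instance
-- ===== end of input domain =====

-- B replaces A's index-advancing scan by bulk replace/count string operations; equal on Pre_part1.

-- ===== PORT A =====
-- the while loop of A: i the index, result the running value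
def part1Loop (s : List Char) (i : Nat) (result : Int) : Int :=
  if h : i < s.length then
    if s[i] = '\\' ∧ s[i+1]? = some '"' then part1Loop s (i+2) (result - 1)
    else if s[i] = '\\' ∧ s[i+1]? = some '\\' then part1Loop s (i+2) (result - 1)
    else if s[i] = '\\' ∧ s[i+1]? = some 'x' then part1Loop s (i+4) (result - 3)
    else if s[i] = '\\' ∧ s[i+1]? = none then result
      -- Python raises IndexError at l[i+1] here; excluded by Pre_part1, value unconstrained
    else part1Loop s (i+1) result
  else result
termination_by s.length - i

def part1 (l : String) : Int :=
  let cs := l.toList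
  part1Loop (PySem.List.slice cs (some 1) (some (-1))) 0 ((cs.length : Int) - 2)

-- ===== PORT B =====
def part1_alt (l : String) : Int :=
  let t := PySem.Chars.replace (PySem.List.slice l.toList (some 1) (some (-1))) ['\\', '\\'] ['A']
  (t.length : Int) - (PySem.Chars.count t ['\\', '"'] : Int) - 3 * (PySem.Chars.count t ['\\', 'x'] : Int)

-- ===== PRECONDITION & SPEC =====
-- true iff the maximal trailing run of backslashes has even length
def pvEvenRun : List Char → Bool
  | [] => true
  | c :: t =>
    if c = '\\' then (if t.all (· == '\\') then (t.length + 1) % 2 == 0 else pvEvenRun t)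
    else pvEvenRun t

-- true iff no "\x" occurrence has a backslash among its next two characters
def pvHexOk : List Char → Bool
  | [] => true
  | c :: t =>
    ((if c = '\\' ∧ t.head? = some 'x' then decide (t[1]? ≠ some '\\') && decide (t[2]? ≠ some '\\') else true)
      && pvHexOk t)

-- Pre_ excludes: strings shorter than 2 (no surrounding quotes to strip, A returns len-2 of the raw
-- string); inner parts whose trailing backslash run is odd (on most of them A raises IndexError at
-- l[i+1], the rest are reached only via a \x jump); and "\x" escapes carrying a backslash in their
-- two payload characters (A's scan jumps over that backslash while B still counts it as an escape).
def Pre_part1 (l : String) : Prop :=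
  2 ≤ l.toList.length ∧
  pvEvenRun (PySem.List.slice l.toList (some 1) (some (-1))) = true ∧
  pvHexOk (PySem.List.slice l.toList (some 1) (some (-1))) = true

instance (l : String) : Decidable (Pre_part1 l) := by unfold Pre_part1; infer_instance

def pvWitness_part1 : String := "\"ab\\\"c\""

def Spec_part1 (l : String) (out : Int) : Prop := out = part1_alt l
instance (l : String) (out : Int) : Decidable (Spec_part1 l out) := by unfold Spec_part1; infer_instance

-- ===== CLAIM (what is proved, stated in full; the proofs are below) =====
def Claim_equal_part1 : Prop := ∀ (l : String), Dom_part1 l → Pre_part1 l → Spec_part1 l (part1 l)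

-- ===== LEMMAS AND PROOFS =====

-- proof-side mirror of inner.replace('\\\\', 'A')
def pvRep : List Char → List Char
  | [] => []
  | [c] => [c]
  | c :: d :: t => if c = '\\' ∧ d = '\\' then 'A' :: pvRep t else c :: pvRep (d :: t)

-- proof-side mirror of t.count('\\"')
def pvCntQ : List Char → Nat
  | [] => 0
  | [_] => 0
  | c :: d :: t => if c = '\\' ∧ d = '"' then pvCntQ t + 1 else pvCntQ (d :: t)

-- proof-side mirror of t.count('\\x')
def pvCntX : List Char → Nat
  | [] => 0
  | [_] => 0
  | c :: d :: t => if c = '\\' ∧ d = 'x' then pvCntX t + 1 else pvCntX (d :: t)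

-- B's value as a function of the inner string
def pvG (s : List Char) : Int :=
  ((pvRep s).length : Int) - (pvCntQ (pvRep s) : Int) - 3 * (pvCntX (pvRep s) : Int)

lemma rep_go (fuel : Nat) : ∀ (l acc : List Char), l.length ≤ fuel →
    PySem.Chars.replace.go ['\\', '\\'] ['A'] fuel l acc = acc.reverse ++ pvRep l := by
  induction fuel with
  | zero =>
    intro l acc h
    have : l = [] := by cases l <;> simp_all
    subst this
    simp [PySem.Chars.replace.go, pvRep]
  | succ m ih =>
    intro l acc h
    match l with
    | [] => simp [PySem.Chars.replace.go, pvRep]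
    | [c] =>
      have hpre : List.isPrefixOf ['\\', '\\'] [c] = false := by simp [List.isPrefixOf]
      simp only [PySem.Chars.replace.go, hpre, Bool.false_eq_true, if_false]
      rw [ih [] (c :: acc) (by simp)]
      simp [pvRep]
    | c :: d :: t =>
      by_cases hc : c = '\\' ∧ d = '\\'
      · obtain ⟨hc1, hc2⟩ := hc; subst hc1; subst hc2
        have hpre : List.isPrefixOf ['\\', '\\'] ('\\' :: '\\' :: t) = true := by
          simp [List.isPrefixOf]
        simp only [PySem.Chars.replace.go, hpre, if_true]
        rw [ih _ _ (by simp at h ⊢; omega)]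
        simp [pvRep]
      · have hpre : List.isPrefixOf ['\\', '\\'] (c :: d :: t) = false := by
          simp [List.isPrefixOf]; intro h1 h2; exact hc ⟨h1.symm, h2.symm⟩
        simp only [PySem.Chars.replace.go, hpre, Bool.false_eq_true, if_false]
        rw [ih (d :: t) (c :: acc) (by simp at h ⊢; omega)]
        simp [pvRep, hc]

lemma rep_eq (s : List Char) : PySem.Chars.replace s ['\\', '\\'] ['A'] = pvRep s := by
  rw [PySem.Chars.replace]
  simp only [List.isEmpty_cons, Bool.false_eq_true, if_false]
  rw [rep_go s.length s [] le_rfl]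
  simp

lemma cntQ_go (fuel : Nat) : ∀ (l : List Char) (acc : Nat), l.length ≤ fuel →
    PySem.Chars.count.go ['\\', '"'] fuel l acc = acc + pvCntQ l := by
  induction fuel with
  | zero =>
    intro l acc h
    have : l = [] := by cases l <;> simp_all
    subst this
    simp [PySem.Chars.count.go, pvCntQ]
  | succ m ih =>
    intro l acc h
    match l with
    | [] => simp [PySem.Chars.count.go, pvCntQ]
    | [c] =>
      have hpre : List.isPrefixOf ['\\', '"'] [c] = false := by simp [List.isPrefixOf]
      simp only [PySem.Chars.count.go, hpre, Bool.false_eq_true, if_false]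
      rw [ih [] acc (by simp)]
      simp [pvCntQ]
    | c :: d :: t =>
      by_cases hc : c = '\\' ∧ d = '"'
      · obtain ⟨hc1, hc2⟩ := hc; subst hc1; subst hc2
        have hpre : List.isPrefixOf ['\\', '"'] ('\\' :: '"' :: t) = true := by
          simp [List.isPrefixOf]
        simp only [PySem.Chars.count.go, hpre, if_true]
        rw [ih _ _ (by simp at h ⊢; omega)]
        simp [pvCntQ]; omega
      · have hpre : List.isPrefixOf ['\\', '"'] (c :: d :: t) = false := by
          simp [List.isPrefixOf]; intro h1 h2; exact hc ⟨h1.symm, h2.symm⟩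
        simp only [PySem.Chars.count.go, hpre, Bool.false_eq_true, if_false]
        rw [ih (d :: t) acc (by simp at h ⊢; omega)]
        simp [pvCntQ, hc]

lemma cntX_go (fuel : Nat) : ∀ (l : List Char) (acc : Nat), l.length ≤ fuel →
    PySem.Chars.count.go ['\\', 'x'] fuel l acc = acc + pvCntX l := by
  induction fuel with
  | zero =>
    intro l acc h
    have : l = [] := by cases l <;> simp_all
    subst this
    simp [PySem.Chars.count.go, pvCntX]
  | succ m ih =>
    intro l acc h
    match l with
    | [] => simp [PySem.Chars.count.go, pvCntX]
    | [c] =>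
      have hpre : List.isPrefixOf ['\\', 'x'] [c] = false := by simp [List.isPrefixOf]
      simp only [PySem.Chars.count.go, hpre, Bool.false_eq_true, if_false]
      rw [ih [] acc (by simp)]
      simp [pvCntX]
    | c :: d :: t =>
      by_cases hc : c = '\\' ∧ d = 'x'
      · obtain ⟨hc1, hc2⟩ := hc; subst hc1; subst hc2
        have hpre : List.isPrefixOf ['\\', 'x'] ('\\' :: 'x' :: t) = true := by
          simp [List.isPrefixOf]
        simp only [PySem.Chars.count.go, hpre, if_true]
        rw [ih _ _ (by simp at h ⊢; omega)]
        simp [pvCntX]; omega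
      · have hpre : List.isPrefixOf ['\\', 'x'] (c :: d :: t) = false := by
          simp [List.isPrefixOf]; intro h1 h2; exact hc ⟨h1.symm, h2.symm⟩
        simp only [PySem.Chars.count.go, hpre, Bool.false_eq_true, if_false]
        rw [ih (d :: t) acc (by simp at h ⊢; omega)]
        simp [pvCntX, hc]

lemma cntQ_eq (t : List Char) : PySem.Chars.count t ['\\', '"'] = pvCntQ t := by
  rw [PySem.Chars.count]
  simp only [List.isEmpty_cons, Bool.false_eq_true, if_false]
  rw [cntQ_go t.length t 0 le_rfl]; omega

lemma cntX_eq (t : List Char) : PySem.Chars.count t ['\\', 'x'] = pvCntX t := by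
  rw [PySem.Chars.count]
  simp only [List.isEmpty_cons, Bool.false_eq_true, if_false]
  rw [cntX_go t.length t 0 le_rfl]; omega

lemma alt_eq_pvG (l : String) :
    part1_alt l = pvG (PySem.List.slice l.toList (some 1) (some (-1))) := by
  simp only [part1_alt, pvG, rep_eq, cntQ_eq, cntX_eq]

-- step lemmas for pvRep / pvCntQ / pvCntX
lemma rep_cons_ne (c : Char) (u : List Char) (hc : c ≠ '\\') : pvRep (c :: u) = c :: pvRep u := by
  cases u with
  | nil => simp [pvRep]
  | cons d t => simp [pvRep, hc]

lemma rep_bsbs (u : List Char) : pvRep ('\\' :: '\\' :: u) = 'A' :: pvRep u := by simp [pvRep]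

lemma rep_bs_ne (c : Char) (u : List Char) (hc : c ≠ '\\') :
    pvRep ('\\' :: c :: u) = '\\' :: pvRep (c :: u) := by
  simp [pvRep, hc]

lemma cntQ_hit (w : List Char) : pvCntQ ('\\' :: '"' :: w) = pvCntQ w + 1 := by simp [pvCntQ]

lemma cntQ_cons_ne (c : Char) (w : List Char) (hc : c ≠ '\\') : pvCntQ (c :: w) = pvCntQ w := by
  cases w with
  | nil => simp [pvCntQ]
  | cons d t => simp [pvCntQ, hc]

lemma cntQ_bs_ne (c : Char) (w : List Char) (hc : c ≠ '"') :
    pvCntQ ('\\' :: c :: w) = pvCntQ (c :: w) := by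
  simp [pvCntQ, hc]

lemma cntX_hit (w : List Char) : pvCntX ('\\' :: 'x' :: w) = pvCntX w + 1 := by simp [pvCntX]

lemma cntX_cons_ne (c : Char) (w : List Char) (hc : c ≠ '\\') : pvCntX (c :: w) = pvCntX w := by
  cases w with
  | nil => simp [pvCntX]
  | cons d t => simp [pvCntX, hc]

lemma cntX_bs_ne (c : Char) (w : List Char) (hc : c ≠ 'x') :
    pvCntX ('\\' :: c :: w) = pvCntX (c :: w) := by
  simp [pvCntX, hc]

-- pvG step lemmas
lemma pvG_nil : pvG [] = 0 := by decide

lemma pvG_cons_ne (c : Char) (u : List Char) (hc : c ≠ '\\') : pvG (c :: u) = 1 + pvG u := by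
  simp only [pvG, rep_cons_ne c u hc, List.length_cons, cntQ_cons_ne c _ hc, cntX_cons_ne c _ hc]
  push_cast; ring

lemma pvG_q (u : List Char) : pvG ('\\' :: '"' :: u) = 1 + pvG u := by
  have h1 : pvRep ('\\' :: '"' :: u) = '\\' :: '"' :: pvRep u := by
    rw [rep_bs_ne _ _ (by decide), rep_cons_ne _ _ (by decide)]
  simp only [pvG, h1, List.length_cons, cntQ_hit,
    cntX_bs_ne '"' _ (by decide), cntX_cons_ne '"' _ (by decide)]
  push_cast; ring

lemma pvG_bs (u : List Char) : pvG ('\\' :: '\\' :: u) = 1 + pvG u := by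
  simp only [pvG, rep_bsbs, List.length_cons,
    cntQ_cons_ne 'A' _ (by decide), cntX_cons_ne 'A' _ (by decide)]
  push_cast; ring

lemma pvG_other (c : Char) (u : List Char) (hq : c ≠ '"') (hb : c ≠ '\\') (hx : c ≠ 'x') :
    pvG ('\\' :: c :: u) = 1 + pvG (c :: u) := by
  have h1 : pvRep ('\\' :: c :: u) = '\\' :: pvRep (c :: u) := rep_bs_ne c u hb
  have h2 : pvRep (c :: u) = c :: pvRep u := rep_cons_ne c u hb
  simp only [pvG, h1, h2, List.length_cons, cntQ_bs_ne c _ hq, cntX_bs_ne c _ hx]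
  push_cast; ring

lemma pvG_x2 : pvG ['\\', 'x'] = -1 := by decide

lemma pvG_x3 (a : Char) : pvG ['\\', 'x', a] = 0 := by
  have h1 : pvRep ['\\', 'x', a] = ['\\', 'x', a] := by
    rw [rep_bs_ne _ _ (by decide), rep_cons_ne _ _ (by decide)]; rfl
  have hq : pvCntQ ['\\', 'x', a] = 0 := by
    rw [cntQ_bs_ne _ _ (by decide), cntQ_cons_ne _ _ (by decide)]; rfl
  have hx : pvCntX ['\\', 'x', a] = 1 := by
    rw [show (['\\', 'x', a] : List Char) = '\\' :: 'x' :: [a] from rfl, cntX_hit]; rfl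
  simp [pvG, h1, hq, hx]

lemma pvG_x (a b : Char) (v : List Char) (ha : a ≠ '\\') (hb : b ≠ '\\') :
    pvG ('\\' :: 'x' :: a :: b :: v) = 1 + pvG v := by
  have h1 : pvRep ('\\' :: 'x' :: a :: b :: v) = '\\' :: 'x' :: a :: b :: pvRep v := by
    rw [rep_bs_ne _ _ (by decide), rep_cons_ne _ _ (by decide),
        rep_cons_ne _ _ ha, rep_cons_ne _ _ hb]
  have hq : pvCntQ ('\\' :: 'x' :: a :: b :: pvRep v) = pvCntQ (pvRep v) := by
    rw [cntQ_bs_ne _ _ (by decide), cntQ_cons_ne _ _ (by decide),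
        cntQ_cons_ne _ _ ha, cntQ_cons_ne _ _ hb]
  have hx : pvCntX ('\\' :: 'x' :: a :: b :: pvRep v) = pvCntX (pvRep v) + 1 := by
    rw [cntX_hit, cntX_cons_ne _ _ ha, cntX_cons_ne _ _ hb]
  simp only [pvG, h1, hq, hx, List.length_cons]
  push_cast; ring

-- pvEvenRun step lemmas
lemma er_cons_ne (c : Char) (t : List Char) (hc : c ≠ '\\') : pvEvenRun (c :: t) = pvEvenRun t := by
  simp [pvEvenRun, hc]

lemma er_bs_notall (t : List Char) (h : t.all (· == '\\') = false) :
    pvEvenRun ('\\' :: t) = pvEvenRun t := by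
  simp [pvEvenRun, h]

lemma er_bsbs (u : List Char) (h : pvEvenRun ('\\' :: '\\' :: u) = true) : pvEvenRun u = true := by
  by_cases hall : u.all (· == '\\') = true
  · have hall' : ('\\' :: u).all (· == '\\') = true := by simp [hall]
    rw [pvEvenRun, if_pos rfl, if_pos hall'] at h
    simp at h
    cases u with
    | nil => rfl
    | cons e u' =>
      have he : e = '\\' := by simp [List.all_cons] at hall; exact hall.1
      have hu' : u'.all (· == '\\') = true := by
        simp only [List.all_cons, Bool.and_eq_true] at hall
        exact hall.2
      subst he
      rw [pvEvenRun, if_pos rfl, if_pos hu']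
      simp at h ⊢
      omega
  · have hall2 : ('\\' :: u).all (· == '\\') = false := by
      simp [List.all_cons]; simpa using hall
    rw [er_bs_notall _ hall2] at h
    rwa [er_bs_notall _ (by simpa using hall)] at h

-- pvHexOk step lemmas
lemma hx_tail (c : Char) (t : List Char) (h : pvHexOk (c :: t) = true) : pvHexOk t = true := by
  rw [pvHexOk] at h
  exact (Bool.and_eq_true_iff.mp h).2

lemma hx_head (u : List Char) (h : pvHexOk ('\\' :: 'x' :: u) = true) :
    u[0]? ≠ some '\\' ∧ u[1]? ≠ some '\\' := by
  rw [pvHexOk] at h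
  have h1 := (Bool.and_eq_true_iff.mp h).1
  rw [if_pos ⟨rfl, rfl⟩] at h1
  have h2 := Bool.and_eq_true_iff.mp h1
  constructor
  · simpa using h2.1
  · simpa using h2.2

-- main loop lemma
lemma loop_eq (s : List Char) (n : Nat) : ∀ (i : Nat) (r : Int), s.length - i ≤ n →
    pvEvenRun (s.drop i) = true → pvHexOk (s.drop i) = true →
    part1Loop s i r = r - ((s.length - i : Nat) : Int) + pvG (s.drop i) := by
  induction n with
  | zero =>
    intro i r h _ _
    have hge : s.length ≤ i := by omega
    rw [part1Loop, dif_neg (by omega)]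
    rw [List.drop_eq_nil_of_le hge]
    simp [pvG_nil, Nat.sub_eq_zero_of_le hge]
  | succ m ih =>
    intro i r h he hh
    by_cases hlt : i < s.length
    · have hu : s.drop i = s[i] :: s.drop (i+1) := List.drop_eq_getElem_cons hlt
      cases hu' : s.drop (i+1) with
      | nil =>
        have hlen : s.length ≤ i + 1 := by
          have hl := List.length_drop (l := s) (i := i+1)
          rw [hu'] at hl; simp at hl; omega
        have hnone : s[i+1]? = none := List.getElem?_eq_none hlen
        by_cases hc : s[i] = '\\'
        · exfalso
          rw [hu, hu', hc] at he
          simp [pvEvenRun] at he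
        · rw [part1Loop, dif_pos hlt, if_neg (fun hco => hc hco.1), if_neg (fun hco => hc hco.1),
              if_neg (fun hco => hc hco.1), if_neg (fun hco => hc hco.1)]
          rw [ih (i+1) r (by omega) (by rw [hu']; rfl) (by rw [hu']; rfl)]
          rw [hu, hu', pvG_cons_ne _ _ hc, pvG_nil]
          omega
      | cons d w =>
        have hd : s[i+1]? = some d := by
          have h0 : (s.drop (i+1))[0]? = s[i+1+0]? := List.getElem?_drop ..
          rw [hu'] at h0; simpa using h0.symm
        have hw : s.drop (i+2) = w := by
          have h0 : (s.drop (i+1)).drop 1 = s.drop (i+2) := by rw [List.drop_drop]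
          rw [hu'] at h0; simpa using h0.symm
        have hi1 : i + 1 < s.length := by
          have hl := List.length_drop (l := s) (i := i+1)
          rw [hu'] at hl; simp at hl; omega
        by_cases hc : s[i] = '\\'
        · rw [hu, hu', hc] at he hh
          by_cases hdq : d = '"'
          · subst hdq
            rw [part1Loop, dif_pos hlt, if_pos ⟨hc, by rw [hd]⟩]
            have he2 : pvEvenRun w = true := by
              rw [er_bs_notall _ (by simp), er_cons_ne _ _ (by decide)] at he; exact he
            have hh2 : pvHexOk w = true := hx_tail _ _ (hx_tail _ _ hh)
            rw [ih (i+2) (r-1) (by omega) (by rw [hw]; exact he2) (by rw [hw]; exact hh2)]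
            rw [hw, hu, hu', hc, pvG_q]
            have h1 : ((s.length - i : Nat) : Int) = ((s.length - (i+2) : Nat) : Int) + 2 := by omega
            rw [h1]; ring
          · by_cases hdb : d = '\\'
            · subst hdb
              rw [part1Loop, dif_pos hlt,
                  if_neg (by rintro ⟨-, h2⟩; rw [hd] at h2; exact hdq (Option.some.inj h2)),
                  if_pos ⟨hc, by rw [hd]⟩]
              have he2 : pvEvenRun w = true := er_bsbs _ he
              have hh2 : pvHexOk w = true := hx_tail _ _ (hx_tail _ _ hh)
              rw [ih (i+2) (r-1) (by omega) (by rw [hw]; exact he2) (by rw [hw]; exact hh2)]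
              rw [hw, hu, hu', hc, pvG_bs]
              have h1 : ((s.length - i : Nat) : Int) = ((s.length - (i+2) : Nat) : Int) + 2 := by omega
              rw [h1]; ring
            · by_cases hdx : d = 'x'
              · subst hdx
                rw [part1Loop, dif_pos hlt,
                    if_neg (by rintro ⟨-, h2⟩; rw [hd] at h2; exact hdq (Option.some.inj h2)),
                    if_neg (by rintro ⟨-, h2⟩; rw [hd] at h2; exact hdb (Option.some.inj h2)),
                    if_pos ⟨hc, by rw [hd]⟩]
                have hpay := hx_head w hh
                cases w with
                | nil =>
                  have hlen2 : s.length = i + 2 := by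
                    have hl := List.length_drop (l := s) (i := i+2)
                    rw [hw] at hl; simp at hl; omega
                  have hnil4 : s.drop (i+4) = [] := List.drop_eq_nil_of_le (by omega)
                  rw [ih (i+4) (r-3) (by omega) (by rw [hnil4]; rfl) (by rw [hnil4]; rfl)]
                  rw [hnil4, hu, hu', hc, pvG_nil, pvG_x2]
                  omega
                | cons a w2 =>
                  have ha : a ≠ '\\' := by
                    intro hcon; subst hcon; simp at hpay
                  cases w2 with
                  | nil =>
                    have hlen2 : s.length = i + 3 := by
                      have hl := List.length_drop (l := s) (i := i+2)
                      rw [hw] at hl; simp at hl; omega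
                    have hnil4 : s.drop (i+4) = [] := List.drop_eq_nil_of_le (by omega)
                    rw [ih (i+4) (r-3) (by omega) (by rw [hnil4]; rfl) (by rw [hnil4]; rfl)]
                    rw [hnil4, hu, hu', hc, pvG_nil, pvG_x3]
                    omega
                  | cons b v =>
                    have hb : b ≠ '\\' := by
                      intro hcon; subst hcon; simp at hpay
                    have hv : s.drop (i+4) = v := by
                      have h0 : (s.drop (i+1)).drop 3 = s.drop (i+4) := by rw [List.drop_drop]
                      rw [hu'] at h0; simpa using h0.symm
                    have hlen2 : i + 4 ≤ s.length := by
                      have hl := List.length_drop (l := s) (i := i+2)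
                      rw [hw] at hl; simp at hl; omega
                    have he4 : pvEvenRun v = true := by
                      rw [er_bs_notall _ (by simp), er_cons_ne _ _ (by decide),
                          er_cons_ne _ _ ha, er_cons_ne _ _ hb] at he
                      exact he
                    have hh4 : pvHexOk v = true :=
                      hx_tail _ _ (hx_tail _ _ (hx_tail _ _ (hx_tail _ _ hh)))
                    rw [ih (i+4) (r-3) (by omega) (by rw [hv]; exact he4) (by rw [hv]; exact hh4)]
                    rw [hv, hu, hu', hc, pvG_x a b v ha hb]
                    have h1 : ((s.length - i : Nat) : Int) = ((s.length - (i+4) : Nat) : Int) + 4 := by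
                      omega
                    rw [h1]; ring
              · rw [part1Loop, dif_pos hlt,
                    if_neg (by rintro ⟨-, h2⟩; rw [hd] at h2; exact hdq (Option.some.inj h2)),
                    if_neg (by rintro ⟨-, h2⟩; rw [hd] at h2; exact hdb (Option.some.inj h2)),
                    if_neg (by rintro ⟨-, h2⟩; rw [hd] at h2; exact hdx (Option.some.inj h2)),
                    if_neg (by rintro ⟨-, h2⟩; rw [hd] at h2; simp at h2)]
                have he1 : pvEvenRun (d :: w) = true := by
                  rw [er_bs_notall _ (by simp [hdb])] at he; exact he
                have hh1 : pvHexOk (d :: w) = true := hx_tail _ _ hh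
                rw [ih (i+1) r (by omega) (by rw [hu']; exact he1) (by rw [hu']; exact hh1)]
                rw [hu', hu, hu', hc, pvG_other d w hdq hdb hdx]
                have h1 : ((s.length - i : Nat) : Int) = ((s.length - (i+1) : Nat) : Int) + 1 := by
                  omega
                rw [h1]; ring
        · rw [part1Loop, dif_pos hlt, if_neg (fun hco => hc hco.1), if_neg (fun hco => hc hco.1),
              if_neg (fun hco => hc hco.1), if_neg (fun hco => hc hco.1)]
          have he1 : pvEvenRun (s.drop (i+1)) = true := by
            rw [hu, er_cons_ne _ _ hc] at he; exact he
          have hh1 : pvHexOk (s.drop (i+1)) = true := by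
            rw [hu] at hh; exact hx_tail _ _ hh
          rw [ih (i+1) r (by omega) he1 hh1]
          rw [hu, pvG_cons_ne _ _ hc]
          have h1 : ((s.length - i : Nat) : Int) = ((s.length - (i+1) : Nat) : Int) + 1 := by omega
          rw [h1]; ring
    · rw [part1Loop, dif_neg hlt]
      have hge : s.length ≤ i := by omega
      rw [List.drop_eq_nil_of_le hge]
      simp [pvG_nil, Nat.sub_eq_zero_of_le hge]

-- ===== VERDICT (by name: the statement is the Claim_ definition above) =====
theorem part1_spec : Claim_equal_part1 := by
  intro l _ hpre
  obtain ⟨hlen, he, hh⟩ := hpre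
  unfold Spec_part1
  rw [alt_eq_pvG]
  show part1 l = _
  unfold part1
  set cs := l.toList with hcs
  set inner := PySem.List.slice cs (some 1) (some (-1)) with hinner
  have hil : inner.length = cs.length - 2 := by
    rw [hinner, PySem.List.length_slice]
    have c1 : PySem.List.clampIdx cs.length (-1) = cs.length - 1 := by simp
    have c2 : PySem.List.clampIdx cs.length 1 = min 1 cs.length := by
      simp
    rw [c1, c2]; omega
  rw [loop_eq inner inner.length 0 _ (by omega) (by simpa using he) (by simpa using hh)]
  simp only [List.drop_zero, Nat.sub_zero]
  rw [hil]
  have hc2 : ((cs.length - 2 : Nat) : Int) = (cs.length : Int) - 2 := by omega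
  rw [hc2]; ring
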